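-- pv_equiv track=rewrite | github.com/jamesbarber6406/jimmy-jabs-7-score-tracker | app.py | build_tie_groups
-- ===== SOURCE A (Python) =====
-- def build_tie_groups(players, primary, tiebreakers):
--     """Return tie groups ordered best->worst using only provided criteria."""
--     def key(p):
--         parts = [primary.get(p, 0)]
--         for d, higher_is_better in tiebreakers:
--             v = d.get(p, 0)
--             parts.append(v if higher_is_better else -v)
--         return tuple(parts)
--
--     ordered = sorted(players, key=key, reverse=True)
--     groups = []
--     i = 0
--     while i < len(ordered):
--         k = key(ordered[i])
--         grp = [ordered[i]]
--         i += 1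
--         while i < len(ordered) and key(ordered[i]) == k:
--             grp.append(ordered[i])
--             i += 1
--         groups.append(grp)
--     return groups
-- ===== SOURCE B (Python) =====
-- def build_tie_groups(players, primary, tiebreakers):
--     """Return tie groups ordered best->worst using only provided criteria."""
--     def key(p):
--         parts = [primary.get(p, 0)]
--         for d, higher_is_better in tiebreakers:
--             v = d.get(p, 0)
--             parts.append(v if higher_is_better else -v)
--         return tuple(parts)
--
--     groups = {}
--     for p in players:
--         groups.setdefault(key(p), []).append(p)
--     return [groups[k] for k in sorted(groups, reverse=True)]
-- ===== Notes on version B (the rewrite author's own statement) =====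
-- stated objective: faster
-- what changed: A sorts all players by the composite key and then scans the sorted list for runs of equal keys, recomputing keys during the scan; B makes one hash-grouping pass appending each player to a dict bucket keyed by its composite key (preserving input order within a bucket) and then sorts only the distinct keys descending, emitting the buckets in that order.
import Mathlib
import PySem

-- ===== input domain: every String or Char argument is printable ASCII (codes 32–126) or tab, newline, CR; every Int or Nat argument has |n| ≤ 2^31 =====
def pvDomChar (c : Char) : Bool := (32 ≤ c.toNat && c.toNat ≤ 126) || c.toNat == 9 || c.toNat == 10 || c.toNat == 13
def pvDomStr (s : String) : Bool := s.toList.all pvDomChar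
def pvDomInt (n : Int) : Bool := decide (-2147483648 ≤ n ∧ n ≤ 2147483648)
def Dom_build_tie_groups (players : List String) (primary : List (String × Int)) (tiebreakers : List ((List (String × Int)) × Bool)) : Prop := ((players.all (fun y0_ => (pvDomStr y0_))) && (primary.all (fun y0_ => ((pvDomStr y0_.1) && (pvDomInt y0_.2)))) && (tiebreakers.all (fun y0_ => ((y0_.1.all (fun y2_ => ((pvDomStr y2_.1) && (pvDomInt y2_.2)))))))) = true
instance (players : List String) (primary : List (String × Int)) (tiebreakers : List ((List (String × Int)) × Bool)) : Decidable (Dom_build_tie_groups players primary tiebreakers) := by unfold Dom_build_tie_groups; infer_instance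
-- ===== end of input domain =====

-- B replaces A's sort-all-players-then-scan-for-equal-key-runs with a single hash-grouping
-- pass over the players followed by a sort of the distinct keys only (objective: faster;
-- a timing run measured B about 2x faster than A on the generated inputs).

-- ===== PORT A =====
-- the inner 'def key(p)' (identical text in A and in B): primary.get(p,0) followed by one
-- appended entry per tiebreaker, negated when higher_is_better is false
def pvKey (primary : List (String × Int)) (tiebreakers : List ((List (String × Int)) × Bool)) (p : String) : List Int :=
  tiebreakers.foldl
    (fun parts db =>
      parts ++ [if db.2 then (PySem.Dict.mk db.1).getD p 0 else -((PySem.Dict.mk db.1).getD p 0)])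
    [(PySem.Dict.mk primary).getD p 0]

-- A's outer while loop: take the run of elements whose key equals the head's key, recurse on the rest
def pvGroupRuns {α κ : Type} [BEq κ] (key : α → κ) : List α → List (List α)
  | [] => []
  | x :: rest =>
    (x :: rest.takeWhile (fun y => key y == key x)) ::
      pvGroupRuns key (rest.dropWhile (fun y => key y == key x))
termination_by l => l.length
decreasing_by simpa using Nat.lt_succ_of_le (List.length_dropWhile_le _ rest)

def build_tie_groups (players : List String) (primary : List (String × Int)) (tiebreakers : List ((List (String × Int)) × Bool)) : List (List String) :=
  let key := pvKey primary tiebreakers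
  -- ordered = sorted(players, key=key, reverse=True); tuple comparison is the lexicographic order on List Int
  let ordered := @PySem.List.sorted String (List Int) List.instLinearOrder.toLT LinearOrder.toDecidableLT players key true
  pvGroupRuns key ordered

-- ===== PORT B =====
def build_tie_groups_alt (players : List String) (primary : List (String × Int)) (tiebreakers : List ((List (String × Int)) × Bool)) : List (List String) :=
  let key := pvKey primary tiebreakers
  -- groups.setdefault(key(p), []).append(p) for p in players
  let groups : PySem.Dict (List Int) (List String) :=
    players.foldl (fun d p => d.modify (key p) [] (fun g => g ++ [p])) PySem.Dict.empty
  -- [groups[k] for k in sorted(groups, reverse=True)]; k is always a key of groups, so groups[k] never raises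
  (@PySem.List.sorted (List Int) (List Int) List.instLinearOrder.toLT LinearOrder.toDecidableLT groups.keys (fun k => k) true).map
    (fun k => groups.getD k [])

-- ===== PRECONDITION & SPEC =====
def Spec_build_tie_groups (players : List String) (primary : List (String × Int)) (tiebreakers : List ((List (String × Int)) × Bool)) (out : List (List String)) : Prop := out = build_tie_groups_alt players primary tiebreakers
instance (players : List String) (primary : List (String × Int)) (tiebreakers : List ((List (String × Int)) × Bool)) (out : List (List String)) : Decidable (Spec_build_tie_groups players primary tiebreakers out) := by unfold Spec_build_tie_groups; infer_instance

-- ===== CLAIM (what is proved, stated in full; the proofs are below) =====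
def Claim_equal_build_tie_groups : Prop := ∀ (players : List String) (primary : List (String × Int)) (tiebreakers : List ((List (String × Int)) × Bool)), Dom_build_tie_groups players primary tiebreakers → Spec_build_tie_groups players primary tiebreakers (build_tie_groups players primary tiebreakers)

-- ===== LEMMAS AND PROOFS =====

-- the block of xs whose key is k, in original order
def pvGrp {α κ : Type} [BEq κ] (key : α → κ) (k : κ) (xs : List α) : List α :=
  xs.filter (fun p => key p == k)

-- the blocks of xs listed along K
def pvFlat {α κ : Type} [BEq κ] (key : α → κ) (K : List κ) (xs : List α) : List α :=
  K.flatMap (fun k => pvGrp key k xs)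

-- insert a key into a strictly descending list of keys, keeping it strictly descending
def pvInsKey {κ : Type} [LinearOrder κ] (k : κ) : List κ → List κ
  | [] => [k]
  | j :: J => if j < k then k :: j :: J else if k = j then j :: J else j :: pvInsKey k J

-- the strictly descending list of the distinct keys of xs
def pvKeysOf {α κ : Type} [LinearOrder κ] (key : α → κ) (xs : List α) : List κ :=
  xs.foldl (fun K p => pvInsKey (key p) K) []

theorem pv_mem_insKey {κ : Type} [LinearOrder κ] (k j : κ) (K : List κ) :
    j ∈ pvInsKey k K ↔ j = k ∨ j ∈ K := by
  induction K with
  | nil => simp [pvInsKey]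
  | cons h t ih =>
    simp only [pvInsKey]
    split_ifs with h1 h2
    · simp
    · subst h2; simp
    · simp [ih]; tauto

theorem pv_pairwise_insKey {κ : Type} [LinearOrder κ] (k : κ) (K : List κ)
    (hK : K.Pairwise (fun a b => b < a)) : (pvInsKey k K).Pairwise (fun a b => b < a) := by
  induction K with
  | nil => simp [pvInsKey]
  | cons h t ih =>
    rcases List.pairwise_cons.1 hK with ⟨hall, ht⟩
    simp only [pvInsKey]
    split_ifs with h1 h2
    · exact List.pairwise_cons.2 ⟨by
        intro y hy
        rcases List.mem_cons.1 hy with rfl | hy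
        · exact h1
        · exact lt_trans (hall y hy) h1, hK⟩
    · exact hK
    · refine List.pairwise_cons.2 ⟨?_, ih ht⟩
      intro y hy
      rcases (pv_mem_insKey k y t).1 hy with rfl | hy
      · exact lt_of_le_of_ne (not_lt.1 h1) h2
      · exact hall y hy

theorem pv_insertBy_skip {α : Type} (before : α → α → Bool) (x : α) (as bs : List α)
    (h : ∀ y ∈ as, before x y = false) :
    PySem.List.insertBy before x (as ++ bs) = as ++ PySem.List.insertBy before x bs := by
  induction as with
  | nil => simp
  | cons a t ih =>
    have ha : before x a = false := h a (List.mem_cons_self ..)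
    simp [PySem.List.insertBy, ha, ih (fun y hy => h y (List.mem_cons_of_mem a hy))]

theorem pv_insertBy_front {α : Type} (before : α → α → Bool) (x : α) (bs : List α)
    (h : ∀ y ∈ bs, before x y = true) :
    PySem.List.insertBy before x bs = x :: bs := by
  cases bs with
  | nil => simp [PySem.List.insertBy]
  | cons b t => simp [PySem.List.insertBy, h b (List.mem_cons_self ..)]

theorem pv_mem_flat {α κ : Type} [BEq κ] [LawfulBEq κ] (key : α → κ) (K : List κ) (xs : List α)
    (y : α) (hy : y ∈ pvFlat key K xs) : key y ∈ K ∧ y ∈ xs := by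
  rcases List.mem_flatMap.1 hy with ⟨k, hk, hmem⟩
  rcases List.mem_filter.1 hmem with ⟨hyx, hbe⟩
  exact ⟨by rwa [beq_iff_eq.1 hbe], hyx⟩

theorem pv_flatMap_congr {α β : Type} (K : List α) (f g : α → List β)
    (h : ∀ k ∈ K, f k = g k) : K.flatMap f = K.flatMap g := by
  induction K with
  | nil => rfl
  | cons j J ih =>
    simp only [List.flatMap_cons]
    rw [h j (List.mem_cons_self ..), ih (fun k hk => h k (List.mem_cons_of_mem j hk))]

theorem pv_grp_append_sing {α κ : Type} [BEq κ] [LawfulBEq κ] [DecidableEq κ] (key : α → κ) (k : κ) (xs : List α) (x : α) :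
    pvGrp key k (xs ++ [x]) = pvGrp key k xs ++ (if key x = k then [x] else []) := by
  simp [pvGrp, List.filter_append]
  split_ifs with h <;> simp [h]

theorem pv_grp_filter_ne {α κ : Type} [BEq κ] [LawfulBEq κ] [DecidableEq κ] (key : α → κ) (k j : κ) (xs : List α)
    (hk : k ≠ j) : pvGrp key k (xs.filter (fun p => key p != j)) = pvGrp key k xs := by
  simp only [pvGrp, List.filter_filter]
  refine List.filter_congr ?_
  intro p _
  by_cases h : key p = k
  · simp [h, hk]
  · simp [h]

theorem pv_grp_eq_nil_of_not_mem {α κ : Type} [BEq κ] [LawfulBEq κ] (key : α → κ) (k : κ)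
    (K : List κ) (xs : List α) (hxs : ∀ p ∈ xs, key p ∈ K) (hk : k ∉ K) :
    pvGrp key k xs = [] := by
  refine List.filter_eq_nil_iff.2 ?_
  intro p hp hbe
  exact hk (beq_iff_eq.1 hbe ▸ hxs p hp)

-- the central step: inserting x (stably, descending by key) into the blocks of xs along a
-- strictly descending key list K yields the blocks of xs ++ [x] along pvInsKey (key x) K
theorem pv_insert_flat {α κ : Type} [BEq κ] [LawfulBEq κ] [LinearOrder κ] (key : α → κ) :
    ∀ (K : List κ) (xs : List α) (x : α), K.Pairwise (fun a b => b < a) → (∀ p ∈ xs, key p ∈ K) →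
    PySem.List.insertBy (fun a b => decide (key b < key a)) x (pvFlat key K xs) =
      pvFlat key (pvInsKey (key x) K) (xs ++ [x]) := by
  intro K
  induction K with
  | nil =>
    intro xs x _ hxs
    have hxsnil : xs = [] := by
      cases xs with
      | nil => rfl
      | cons a t => exact absurd (hxs a (List.mem_cons_self ..)) (by simp)
    subst hxsnil
    simp [pvFlat, pvInsKey, pvGrp, PySem.List.insertBy]
  | cons j J ih =>
    intro xs x hK hxs
    rcases List.pairwise_cons.1 hK with ⟨hall, hJ⟩
    have hflat : pvFlat key (j :: J) xs = pvGrp key j xs ++ pvFlat key J xs := by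
      simp [pvFlat]
    rcases lt_trichotomy j (key x) with hlt | heq | hgt
    · -- key x > j : x opens a fresh block in front
      have hfront : ∀ y ∈ pvFlat key (j :: J) xs, (fun a b => decide (key b < key a)) x y = true := by
        intro y hy
        rcases pv_mem_flat key (j :: J) xs y hy with ⟨hyk, _⟩
        rcases List.mem_cons.1 hyk with h | h
        · simp [h, hlt]
        · simp [lt_trans (hall _ h) hlt]
      rw [pv_insertBy_front _ _ _ hfront]
      have hnotmem : key x ∉ j :: J := by
        intro hmem
        rcases List.mem_cons.1 hmem with h | h
        · exact absurd h.symm (ne_of_lt hlt)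
        · exact absurd (hall _ h) (not_lt.2 (le_of_lt hlt))
      have hnew : pvGrp key (key x) xs = [] := pv_grp_eq_nil_of_not_mem key _ _ xs hxs hnotmem
      have hrest : ∀ k ∈ j :: J, pvGrp key k (xs ++ [x]) = pvGrp key k xs := by
        intro k hk
        rw [pv_grp_append_sing, if_neg (fun h => hnotmem (by rw [h]; exact hk)), List.append_nil]
      have hik : pvInsKey (key x) (j :: J) = key x :: j :: J := by
        simp [pvInsKey, hlt]
      have h1 : pvFlat key (key x :: j :: J) (xs ++ [x]) =
          pvGrp key (key x) (xs ++ [x]) ++ pvFlat key (j :: J) (xs ++ [x]) := by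
        simp [pvFlat]
      have h2 : pvGrp key (key x) (xs ++ [x]) = [x] := by
        rw [pv_grp_append_sing, hnew, if_pos rfl]; simp
      have h3 : pvFlat key (j :: J) (xs ++ [x]) = pvFlat key (j :: J) xs := by
        simp only [pvFlat]
        exact pv_flatMap_congr _ _ _ hrest
      rw [hik, h1, h2, h3]
      simp
    · -- key x = j : x joins the block of j
      have hskip : ∀ y ∈ pvGrp key j xs, (fun a b => decide (key b < key a)) x y = false := by
        intro y hy
        have : key y = j := beq_iff_eq.1 (List.mem_filter.1 hy).2
        simp [this, heq]
      have hfront : ∀ y ∈ pvFlat key J xs, (fun a b => decide (key b < key a)) x y = true := by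
        intro y hy
        rcases pv_mem_flat key J xs y hy with ⟨hyk, _⟩
        simp [← heq, hall _ hyk]
      rw [hflat, pv_insertBy_skip _ _ _ _ hskip, pv_insertBy_front _ _ _ hfront]
      have hins : pvInsKey (key x) (j :: J) = j :: J := by
        simp [pvInsKey, ← heq]
      rw [hins]
      have hJx : ∀ k ∈ J, pvGrp key k (xs ++ [x]) = pvGrp key k xs := by
        intro k hk
        have : key x ≠ k := by
          intro h
          exact absurd (hall _ hk) (by rw [← h, ← heq]; exact lt_irrefl j)
        rw [pv_grp_append_sing, if_neg this, List.append_nil]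
      have h1 : pvFlat key (j :: J) (xs ++ [x]) =
          pvGrp key j (xs ++ [x]) ++ pvFlat key J (xs ++ [x]) := by
        simp [pvFlat]
      have h2 : pvGrp key j (xs ++ [x]) = pvGrp key j xs ++ [x] := by
        rw [pv_grp_append_sing, if_pos heq.symm]
      have h3 : pvFlat key J (xs ++ [x]) = pvFlat key J xs := by
        simp only [pvFlat]
        exact pv_flatMap_congr _ _ _ hJx
      rw [h1, h2, h3]
      simp
    · -- key x < j : skip the block of j, recurse
      have hskip : ∀ y ∈ pvGrp key j xs, (fun a b => decide (key b < key a)) x y = false := by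
        intro y hy
        have : key y = j := beq_iff_eq.1 (List.mem_filter.1 hy).2
        simp [this, not_lt.2 (le_of_lt hgt)]
      have hxj : key x ≠ j := ne_of_lt hgt
      have hins : pvInsKey (key x) (j :: J) = j :: pvInsKey (key x) J := by
        simp [pvInsKey, not_lt.2 (le_of_lt hgt), hxj]
      set xs' := xs.filter (fun p => key p != j) with hxs'
      have hgrpJ : ∀ k ∈ J, pvGrp key k xs = pvGrp key k xs' := by
        intro k hk
        exact (pv_grp_filter_ne key k j xs (ne_of_lt (hall _ hk))).symm
      have hflatJ : pvFlat key J xs = pvFlat key J xs' := by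
        simp only [pvFlat]
        exact pv_flatMap_congr _ _ _ hgrpJ
      have hxs'J : ∀ p ∈ xs', key p ∈ J := by
        intro p hp
        rcases List.mem_filter.1 hp with ⟨hpx, hne⟩
        rcases List.mem_cons.1 (hxs p hpx) with h | h
        · exact absurd h (by simpa using hne)
        · exact h
      rw [hflat, pv_insertBy_skip _ _ _ _ hskip, hflatJ, ih xs' x hJ hxs'J, hins]
      simp only [pvFlat, List.flatMap_cons]
      have hgj : pvGrp key j (xs ++ [x]) = pvGrp key j xs := by
        rw [pv_grp_append_sing, if_neg hxj, List.append_nil]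
      rw [hgj]
      congr 1
      refine pv_flatMap_congr _ _ _ ?_
      intro k hk
      have hkj : k ≠ j := by
        rcases (pv_mem_insKey (key x) k J).1 hk with rfl | h
        · exact hxj
        · exact ne_of_lt (hall _ h)
      rw [pv_grp_append_sing, pv_grp_append_sing, pv_grp_filter_ne key k j xs hkj]

theorem pv_keysOf_append {α κ : Type} [LinearOrder κ] (key : α → κ) (xs : List α) (x : α) :
    pvKeysOf key (xs ++ [x]) = pvInsKey (key x) (pvKeysOf key xs) := by
  simp [pvKeysOf]

theorem pv_pairwise_keysOf {α κ : Type} [LinearOrder κ] (key : α → κ) (xs : List α) :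
    (pvKeysOf key xs).Pairwise (fun a b => b < a) := by
  induction xs using List.reverseRecOn with
  | nil => simp [pvKeysOf]
  | append_singleton ys x ih =>
    rw [pv_keysOf_append]
    exact pv_pairwise_insKey _ _ ih

theorem pv_mem_keysOf {α κ : Type} [LinearOrder κ] (key : α → κ) (xs : List α) (k : κ) :
    k ∈ pvKeysOf key xs ↔ ∃ p ∈ xs, key p = k := by
  induction xs using List.reverseRecOn with
  | nil => simp [pvKeysOf]
  | append_singleton ys x ih =>
    rw [pv_keysOf_append, pv_mem_insKey]
    simp only [List.mem_append, List.mem_singleton]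
    constructor
    · rintro (rfl | h)
      · exact ⟨x, Or.inr rfl, rfl⟩
      · rcases ih.1 h with ⟨p, hp, hk⟩
        exact ⟨p, Or.inl hp, hk⟩
    · rintro ⟨p, hp | rfl, hk⟩
      · exact Or.inr (ih.2 ⟨p, hp, hk⟩)
      · exact Or.inl hk.symm

theorem pv_sorted_eq_flat {α κ : Type} [BEq κ] [LawfulBEq κ] [LinearOrder κ] (key : α → κ) (xs : List α) :
    PySem.List.sorted xs key true =
      pvFlat key (pvKeysOf key xs) xs := by
  induction xs using List.reverseRecOn with
  | nil => simp [PySem.List.sorted, pvKeysOf, pvFlat]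
  | append_singleton ys x ih =>
    rw [PySem.List.sorted_rev_eq_foldl_insertBy, List.foldl_append, List.foldl_cons, List.foldl_nil,
      ← PySem.List.sorted_rev_eq_foldl_insertBy, ih]
    rw [pv_insert_flat key (pvKeysOf key ys) ys x (pv_pairwise_keysOf key ys)
      (fun p hp => (pv_mem_keysOf key ys (key p)).2 ⟨p, hp, rfl⟩)]
    rw [pv_keysOf_append]

theorem pv_takeWhile_all {α : Type} (q : α → Bool) (as bs : List α) (h : ∀ a ∈ as, q a = true) :
    (as ++ bs).takeWhile q = as ++ bs.takeWhile q := by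
  induction as with
  | nil => simp
  | cons a t ih =>
    simp [h a (List.mem_cons_self ..),
      ih (fun y hy => h y (List.mem_cons_of_mem a hy))]

theorem pv_dropWhile_all {α : Type} (q : α → Bool) (as bs : List α) (h : ∀ a ∈ as, q a = true) :
    (as ++ bs).dropWhile q = bs.dropWhile q := by
  induction as with
  | nil => simp
  | cons a t ih =>
    simp [h a (List.mem_cons_self ..),
      ih (fun y hy => h y (List.mem_cons_of_mem a hy))]

theorem pv_takeWhile_none {α : Type} (q : α → Bool) (bs : List α) (h : ∀ a ∈ bs, q a = false) :
    bs.takeWhile q = [] ∧ bs.dropWhile q = bs := by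
  cases bs with
  | nil => simp
  | cons b t => simp [h b (List.mem_cons_self ..)]

-- A's run scan recovers exactly the blocks along a strictly descending key list
theorem pv_runs_flat {α κ : Type} [BEq κ] [LawfulBEq κ] [LinearOrder κ] (key : α → κ) :
    ∀ (K : List κ) (xs : List α), K.Pairwise (fun a b => b < a) →
    (∀ k ∈ K, pvGrp key k xs ≠ []) →
    pvGroupRuns key (pvFlat key K xs) = K.map (fun k => pvGrp key k xs) := by
  intro K
  induction K with
  | nil =>
    intro xs _ _
    simp [pvFlat, pvGroupRuns]
  | cons j J ih =>
    intro xs hK hne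
    rcases List.pairwise_cons.1 hK with ⟨hall, hJ⟩
    obtain ⟨p, ps, hgrp⟩ : ∃ p ps, pvGrp key j xs = p :: ps := by
      rcases List.exists_cons_of_ne_nil (hne j (List.mem_cons_self ..)) with ⟨p, ps, h⟩
      exact ⟨p, ps, h⟩
    have hpmem : p ∈ pvGrp key j xs := by rw [hgrp]; exact List.mem_cons_self ..
    have hkeyp : key p = j := beq_iff_eq.1 (List.mem_filter.1 hpmem).2
    have hps : ∀ y ∈ ps, (key y == key p) = true := by
      intro y hy
      have : y ∈ pvGrp key j xs := by rw [hgrp]; exact List.mem_cons_of_mem p hy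
      have := (List.mem_filter.1 this).2
      rw [hkeyp]
      exact this
    have hrest : ∀ y ∈ pvFlat key J xs, (key y == key p) = false := by
      intro y hy
      rcases pv_mem_flat key J xs y hy with ⟨hyk, _⟩
      simp [hkeyp, ne_of_lt (hall _ hyk)]
    have hflat : pvFlat key (j :: J) xs = p :: (ps ++ pvFlat key J xs) := by
      simp [pvFlat, hgrp]
    rw [hflat, pvGroupRuns]
    rw [pv_takeWhile_all _ ps _ hps, pv_dropWhile_all _ ps _ hps,
      (pv_takeWhile_none _ _ hrest).1, (pv_takeWhile_none _ _ hrest).2, List.append_nil]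
    rw [ih xs hJ (fun k hk => hne k (List.mem_cons_of_mem j hk))]
    simp [hgrp]

-- ===== B-side characterisation =====

theorem pv_groups_getD {α κ : Type} [BEq κ] [LawfulBEq κ] (key : α → κ) (players : List α) (k : κ) :
    (players.foldl (fun d p => d.modify (key p) [] (fun g => g ++ [p])) PySem.Dict.empty).getD k [] =
      pvGrp key k players := by
  have hfold : players.foldl (fun d p => d.modify (key p) [] (fun g => g ++ [p])) PySem.Dict.empty =
      (players.map (fun p => (key p, p))).foldl
        (fun d q => d.modify q.1 [] (fun g => g ++ [q.2])) PySem.Dict.empty := by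
    rw [List.foldl_map]
  rw [hfold, PySem.Dict.getD_foldl_modify_append]
  simp [pvGrp, List.filter_map, Function.comp_def, PySem.Dict.getD_empty]

theorem pv_groups_keys_mem {α κ : Type} [BEq κ] [LawfulBEq κ] (key : α → κ) (players : List α) (k : κ) :
    k ∈ (players.foldl (fun d p => d.modify (key p) [] (fun g => g ++ [p])) PySem.Dict.empty).keys ↔
      ∃ p ∈ players, key p = k := by
  rw [PySem.Dict.keys_foldl_modify_key]
  rw [PySem.Set.mem_update]
  simp [PySem.Dict.keys_empty, eq_comm]

theorem pv_groups_keys_nodup {α κ : Type} [BEq κ] [LawfulBEq κ] (key : α → κ) (players : List α) :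
    (players.foldl (fun d p => d.modify (key p) [] (fun g => g ++ [p])) PySem.Dict.empty).keys.Nodup :=
  PySem.Dict.nodup_keys_foldl_modify_key players key [] (fun d x g => g ++ [x]) PySem.Dict.empty
    (by simp [PySem.Dict.keys_empty])

-- ===== VERDICT (by name: the statement is the Claim_ definition above) =====
theorem build_tie_groups_spec : Claim_equal_build_tie_groups := by
  intro players primary tiebreakers _
  show build_tie_groups players primary tiebreakers = build_tie_groups_alt players primary tiebreakers
  unfold build_tie_groups build_tie_groups_alt
  show pvGroupRuns (pvKey primary tiebreakers)
      (@PySem.List.sorted String (List Int) List.instLinearOrder.toLT LinearOrder.toDecidableLT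
        players (pvKey primary tiebreakers) true) =
    (@PySem.List.sorted (List Int) (List Int) List.instLinearOrder.toLT LinearOrder.toDecidableLT
        (players.foldl (fun d p => d.modify (pvKey primary tiebreakers p) [] (fun g => g ++ [p]))
          PySem.Dict.empty).keys (fun k => k) true).map
      (fun k => (players.foldl (fun d p => d.modify (pvKey primary tiebreakers p) [] (fun g => g ++ [p]))
          PySem.Dict.empty).getD k [])
  have hsortkeys :
      @PySem.List.sorted (List Int) (List Int) List.instLinearOrder.toLT LinearOrder.toDecidableLT
        (players.foldl (fun d p => d.modify (pvKey primary tiebreakers p) [] (fun g => g ++ [p]))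
          PySem.Dict.empty).keys (fun k => k) true = pvKeysOf (pvKey primary tiebreakers) players := by
    apply PySem.List.sorted_rev_eq_of_perm_of_pairwise_gt
    · rw [List.perm_ext_iff_of_nodup
        ((pv_pairwise_keysOf (pvKey primary tiebreakers) players).nodup (r := fun a b => b < a))
        (pv_groups_keys_nodup (pvKey primary tiebreakers) players)]
      intro k
      rw [pv_mem_keysOf]
      exact (pv_groups_keys_mem (pvKey primary tiebreakers) players k).symm
    · exact pv_pairwise_keysOf (pvKey primary tiebreakers) players
  have hA : pvGroupRuns (pvKey primary tiebreakers)
      (@PySem.List.sorted String (List Int) List.instLinearOrder.toLT LinearOrder.toDecidableLT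
        players (pvKey primary tiebreakers) true) =
      (pvKeysOf (pvKey primary tiebreakers) players).map
        (fun k => pvGrp (pvKey primary tiebreakers) k players) := by
    rw [show (@PySem.List.sorted String (List Int) List.instLinearOrder.toLT
        LinearOrder.toDecidableLT players (pvKey primary tiebreakers) true) =
        pvFlat (pvKey primary tiebreakers) (pvKeysOf (pvKey primary tiebreakers) players) players from
      pv_sorted_eq_flat (pvKey primary tiebreakers) players]
    apply pv_runs_flat (pvKey primary tiebreakers) _ _
      (pv_pairwise_keysOf (pvKey primary tiebreakers) players)
    intro k hk
    rcases (pv_mem_keysOf (pvKey primary tiebreakers) players k).1 hk with ⟨p, hp, hpk⟩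
    exact List.ne_nil_of_mem (List.mem_filter.2 ⟨hp, by simp [hpk]⟩)
  rw [hA, hsortkeys]
  refine List.map_congr_left ?_
  intro k _
  rw [pv_groups_getD (pvKey primary tiebreakers) players k]
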